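-- pv_equiv track=rewrite | github.com/lastosellie/algorithm | Programmers/202.032204.py | solution
-- ===== SOURCE A (Python) =====
-- def solution(scores):
--     target = scores[0]
--     scores.sort(key=lambda x: (-x[0], x[1]))
--     maxL, answer = 0, 1
--     for s in scores:
--         if target[0] < s[0] and target[1] < s[1]:
--             return -1
--
--         if maxL <= s[1]:
--             if sum(target) < sum(s):
--                 answer += 1
--             maxL = s[1]
--     return answer
-- ===== SOURCE B (Python) =====
-- def solution(scores):
--     # B does not sort or otherwise mutate `scores` (A sorts it in place);
--     # only the return value is the same.
--     target = scores[0]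
--     if any(q[0] > target[0] and q[1] > target[1] for q in scores):
--         return -1
--     t = sum(target)
--
--     def needed(p):
--         # second score a pair must reach to make the cut: the best second score
--         # among pairs with a strictly higher first score, and no less than 0
--         return max([0] + [q[1] for q in scores if q[0] > p[0]])
--
--     return 1 + sum(1 for s in scores if sum(s) > t and s[1] >= needed(s))
-- ===== Notes on version B (the rewrite author's own statement) =====
-- stated objective: alternative
-- what changed: A sorts the list and makes one frontier sweep carrying a running max of second coordinates; B does no sorting and instead decides each pair independently against a per-pair threshold (the best second score among pairs with strictly higher first score, floored at 0) computed by a direct scan, and it does not mutate the argument.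
import Mathlib
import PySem

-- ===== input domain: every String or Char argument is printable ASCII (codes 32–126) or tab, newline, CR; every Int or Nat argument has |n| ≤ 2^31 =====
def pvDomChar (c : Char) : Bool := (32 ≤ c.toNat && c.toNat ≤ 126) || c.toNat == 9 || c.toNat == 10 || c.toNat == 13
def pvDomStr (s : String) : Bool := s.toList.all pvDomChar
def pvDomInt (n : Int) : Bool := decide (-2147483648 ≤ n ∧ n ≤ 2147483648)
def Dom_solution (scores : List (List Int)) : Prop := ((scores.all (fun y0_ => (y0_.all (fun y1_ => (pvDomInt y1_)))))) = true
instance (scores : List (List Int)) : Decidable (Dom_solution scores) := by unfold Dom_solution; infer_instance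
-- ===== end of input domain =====

-- B replaces A's sorted single-pass running-max frontier by independent per-pair threshold
-- scans (objective: alternative decomposition, not faster). A sorts `scores` in place; B does
-- not mutate its argument — the equivalence proved is about the return value only.

-- ===== PORT A =====
-- the `for s in scores` loop of A, carrying (maxL, answer); early `return -1` is the first branch
def solutionLoop (target : List Int) (maxL answer : Int) : List (List Int) → Int
  | [] => answer
  | s :: rest =>
    if PySem.List.pyGetD target 0 0 < PySem.List.pyGetD s 0 0 ∧
       PySem.List.pyGetD target 1 0 < PySem.List.pyGetD s 1 0 then
      -1
    else if maxL ≤ PySem.List.pyGetD s 1 0 then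
      solutionLoop target (PySem.List.pyGetD s 1 0)
        (if target.sum < s.sum then answer + 1 else answer) rest
    else
      solutionLoop target maxL answer rest

def solution (scores : List (List Int)) : Int :=
  let target := PySem.List.pyGetD scores 0 []   -- scores[0]; Pre_ guarantees scores ≠ []
  let sortedScores := PySem.List.sorted2 scores
      (fun x => -(PySem.List.pyGetD x 0 0)) (fun x => PySem.List.pyGetD x 1 0)
  solutionLoop target 0 1 sortedScores

-- ===== PORT B =====
-- helper `needed(p)` of Source B: max([0] + [q[1] for q in scores if q[0] > p[0]]) — Python's
-- max of a list headed by 0 IS the running-max loop seeded 0 (PySem.List.max?_id_cons)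
def neededFn (scores : List (List Int)) (p : List Int) : Int :=
  ((scores.filter fun q => PySem.List.pyGetD q 0 0 > PySem.List.pyGetD p 0 0).map
      fun q => PySem.List.pyGetD q 1 0).foldl max 0

def solution_alt (scores : List (List Int)) : Int :=
  let target := PySem.List.pyGetD scores 0 []
  if scores.any (fun q =>
      PySem.List.pyGetD q 0 0 > PySem.List.pyGetD target 0 0 &&
      PySem.List.pyGetD q 1 0 > PySem.List.pyGetD target 1 0) then -1
  else
    let t := target.sum
    1 + (scores.countP (fun s =>
          s.sum > t && PySem.List.pyGetD s 1 0 ≥ neededFn scores s) : Int)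

-- ===== PRECONDITION & SPEC =====
-- A raises IndexError on an empty list (scores[0]) and on any row of fewer than two entries
-- (s[0]/s[1] in the sort key and the loop); Pre_ excludes exactly those inputs.
def Pre_solution (scores : List (List Int)) : Prop :=
  scores ≠ [] ∧ ∀ s ∈ scores, 2 ≤ s.length
instance (scores : List (List Int)) : Decidable (Pre_solution scores) := by
  unfold Pre_solution; infer_instance

def pvWitness_solution : List (List Int) := [[2, 2], [1, 4], [3, 1]]

def Spec_solution (scores : List (List Int)) (out : Int) : Prop := out = solution_alt scores
instance (scores : List (List Int)) (out : Int) : Decidable (Spec_solution scores out) := by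
  unfold Spec_solution; infer_instance

-- ===== CLAIM (what is proved, stated in full; the proofs are below) =====
def Claim_equal_solution : Prop := ∀ (scores : List (List Int)), Dom_solution scores → Pre_solution scores → Spec_solution scores (solution scores)

-- ===== LEMMAS AND PROOFS =====

-- abbreviations for the two coordinates (proof-side only)
def pvX0 (s : List Int) : Int := PySem.List.pyGetD s 0 0
def pvX1 (s : List Int) : Int := PySem.List.pyGetD s 1 0

theorem pyGet0_fold (s : List Int) : PySem.List.pyGetD s 0 0 = pvX0 s := rfl
theorem pyGet1_fold (s : List Int) : PySem.List.pyGetD s 1 0 = pvX1 s := rfl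

-- "some member of `scores` beats p in both coordinates" (proof-side abbreviation)
def dominatedIn (scores : List (List Int)) (p : List Int) : Bool :=
  scores.any (fun q => decide (pvX0 p < pvX0 q) && decide (pvX1 p < pvX1 q))

-- sorted2 with keys (k1, k2) is sorted with the lexicographic key x ↦ toLex (k1 x, k2 x)
theorem sorted2_eq_sorted_lex (xs : List (List Int)) (k1 k2 : List Int → Int) :
    PySem.List.sorted2 xs k1 k2 =
      PySem.List.sorted xs (fun x => toLex (k1 x, k2 x)) := by
  rw [PySem.List.sorted_eq_foldl_insertBy]
  show List.foldl _ [] xs = _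
  congr 1
  funext acc x
  congr 1
  funext a b
  have h : (toLex (k1 a, k2 a) < toLex (k1 b, k2 b)) ↔
      (k1 a < k1 b ∨ (k1 a = k1 b ∧ k2 a < k2 b)) := Prod.Lex.lt_iff ..
  by_cases h1 : k1 a < k1 b <;> by_cases h2 : k1 b < k1 a <;> by_cases h3 : k2 a < k2 b <;>
    simp [h, h1, h2, h3] <;> omega

-- the sorted list is pairwise ordered: larger first coordinate first, ties by second ascending
theorem sortedScores_pairwise (scores : List (List Int)) :
    (PySem.List.sorted2 scores (fun x => -(pvX0 x)) (fun x => pvX1 x)).Pairwise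
      (fun a b => pvX0 b < pvX0 a ∨ (pvX0 a = pvX0 b ∧ pvX1 a ≤ pvX1 b)) := by
  rw [sorted2_eq_sorted_lex]
  have h := PySem.List.sorted_pairwise scores (fun x => toLex (-(pvX0 x), pvX1 x))
  refine h.imp ?_
  intro a b hab
  rcases Prod.Lex.le_iff.mp hab with h' | ⟨h1, h2⟩
  · exact Or.inl (by simpa using h')
  · exact Or.inr ⟨by simpa using (neg_injective (by simpa using h1)), h2⟩

-- a running max over a list is ≤ c iff the seed and every projected element are
theorem foldl_max_le_iff (xs : List (List Int)) (i c : Int) :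
    xs.foldl (fun a y => max a (pvX1 y)) i ≤ c ↔ i ≤ c ∧ ∀ x ∈ xs, pvX1 x ≤ c := by
  induction xs generalizing i with
  | nil => simp
  | cons x t ih =>
    simp only [List.foldl_cons, ih, List.mem_cons, max_le_iff]
    constructor
    · rintro ⟨⟨h1, h2⟩, h3⟩
      exact ⟨h1, fun y hy => by rcases hy with rfl | hy; exact h2; exact h3 y hy⟩
    · rintro ⟨h1, h2⟩
      exact ⟨⟨h1, h2 x (Or.inl rfl)⟩, fun y hy => h2 y (Or.inr hy)⟩

-- main invariant: A's loop over the suffix, with maxL = running max (seeded 0) of the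
-- prefix's second coordinates, returns -1 iff the suffix dominates the target, else counts
-- the non-dominated rows with nonnegative second coordinate that outscore the target
theorem loop_spec (target : List Int) (l : List (List Int))
    (hsort : l.Pairwise (fun a b => pvX0 b < pvX0 a ∨ (pvX0 a = pvX0 b ∧ pvX1 a ≤ pvX1 b))) :
    ∀ suf pre M ans, l = pre ++ suf → M = (pre.foldl (fun a y => max a (pvX1 y)) 0) →
      solutionLoop target M ans suf =
        if suf.any (fun s => decide (pvX0 s > pvX0 target) && decide (pvX1 s > pvX1 target)) then -1
        else ans + (suf.countP (fun s =>
          decide (pvX1 s ≥ 0) && decide (s.sum > target.sum) && !dominatedIn l s) : Int) := by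
  intro suf
  induction suf with
  | nil => intro pre M ans _ _; simp [solutionLoop]
  | cons s rest ih =>
    intro pre M ans hl hM
    have hpair := hl ▸ hsort
    rw [List.pairwise_append] at hpair
    obtain ⟨_, hsufp, hcross⟩ := hpair
    rw [List.pairwise_cons] at hsufp
    obtain ⟨hsrest, _⟩ := hsufp
    have hcs : ∀ p ∈ pre, pvX0 s < pvX0 p ∨ (pvX0 p = pvX0 s ∧ pvX1 p ≤ pvX1 s) :=
      fun p hp => hcross p hp s (List.mem_cons_self ..)
    have hdom : dominatedIn l s
        = pre.any (fun q => decide (pvX0 q > pvX0 s) && decide (pvX1 q > pvX1 s)) := by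
      rw [Bool.eq_iff_iff]
      simp only [dominatedIn, List.any_eq_true, Bool.and_eq_true, decide_eq_true_eq,
        gt_iff_lt, hl, List.mem_append, List.mem_cons]
      constructor
      · rintro ⟨q, hq, h1, h2⟩
        rcases hq with hq | rfl | hq
        · exact ⟨q, hq, h1, h2⟩
        · exact absurd h1 (by omega)
        · exact absurd (hsrest q hq) (by omega)
      · rintro ⟨q, hq, h1, h2⟩
        exact ⟨q, Or.inl hq, h1, h2⟩
    have hkey : (M ≤ pvX1 s) ↔ (0 ≤ pvX1 s ∧ dominatedIn l s = false) := by
      rw [hM, foldl_max_le_iff, hdom, List.any_eq_false]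
      simp only [Bool.and_eq_true, decide_eq_true_eq, gt_iff_lt, not_and]
      constructor
      · rintro ⟨h0, hall⟩
        exact ⟨h0, fun q hq => by have := hall q hq; omega⟩
      · rintro ⟨h0, hnd⟩
        refine ⟨h0, fun p hp => ?_⟩
        have h1 := hnd p hp
        rcases hcs p hp with h | ⟨_, h⟩
        · omega
        · exact h
    show (if pvX0 target < pvX0 s ∧ pvX1 target < pvX1 s then -1
      else if M ≤ pvX1 s then
        solutionLoop target (pvX1 s) (if target.sum < s.sum then ans + 1 else ans) rest
      else solutionLoop target M ans rest) = _
    by_cases hd : pvX0 target < pvX0 s ∧ pvX1 target < pvX1 s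
    · rw [if_pos hd]
      simp [List.any_cons, gt_iff_lt, hd.1, hd.2]
    · have hanys : (decide (pvX0 s > pvX0 target) && decide (pvX1 s > pvX1 target)) = false := by
        simp only [Bool.and_eq_false_iff, decide_eq_false_iff_not, gt_iff_lt]
        by_cases h : pvX0 target < pvX0 s
        · exact Or.inr (fun h2 => hd ⟨h, h2⟩)
        · exact Or.inl h
      have hlf : l = (pre ++ [s]) ++ rest := by rw [hl]; simp
      have hcnt : ((s :: rest).countP (fun s =>
            decide (pvX1 s ≥ 0) && decide (s.sum > target.sum) && !dominatedIn l s) : Int)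
          = (if (decide (pvX1 s ≥ 0) && decide (s.sum > target.sum) && !dominatedIn l s) = true
              then 1 else 0)
            + (rest.countP (fun s =>
              decide (pvX1 s ≥ 0) && decide (s.sum > target.sum) && !dominatedIn l s) : Int) := by
        rw [List.countP_cons]
        split_ifs <;> push_cast <;> ring
      by_cases hm : M ≤ pvX1 s
      · have hnd := hkey.mp hm
        have hMf : pvX1 s = ((pre ++ [s]).foldl (fun a y => max a (pvX1 y)) 0) := by
          rw [List.foldl_append, ← hM]
          show pvX1 s = max M (pvX1 s)
          omega
        have hps : (decide (pvX1 s ≥ 0) && decide (s.sum > target.sum) && !dominatedIn l s)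
            = decide (s.sum > target.sum) := by
          simp [hnd.1, hnd.2]
        rw [if_neg hd, if_pos hm, ih (pre ++ [s]) (pvX1 s) _ hlf hMf,
          List.any_cons, hanys, Bool.false_or, hcnt, hps]
        by_cases h1 : (rest.any fun s => decide (pvX0 s > pvX0 target) && decide (pvX1 s > pvX1 target)) = true
        · rw [if_pos h1, if_pos h1]
        · rw [if_neg h1, if_neg h1]
          by_cases hss : target.sum < s.sum
          · rw [if_pos hss, if_pos (show decide (s.sum > target.sum) = true by simpa using hss)]
            omega
          · rw [if_neg hss, if_neg (show ¬ decide (s.sum > target.sum) = true by simpa using hss)]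
            omega
      · have hnd : ¬ (0 ≤ pvX1 s ∧ dominatedIn l s = false) := fun h => hm (hkey.mpr h)
        have hMf : M = ((pre ++ [s]).foldl (fun a y => max a (pvX1 y)) 0) := by
          rw [List.foldl_append, ← hM]
          show M = max M (pvX1 s)
          omega
        have hp : (decide (pvX1 s ≥ 0) && decide (s.sum > target.sum) && !dominatedIn l s) = false := by
          cases hb : dominatedIn l s with
          | true => simp
          | false =>
            have h0 : ¬ (0 ≤ pvX1 s) := fun h => hnd ⟨h, hb⟩
            simp [h0]
        rw [if_neg hd, if_neg hm, ih (pre ++ [s]) M _ hlf hMf,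
          List.any_cons, hanys, Bool.false_or, hcnt, hp]
        by_cases h1 : (rest.any fun s => decide (pvX0 s > pvX0 target) && decide (pvX1 s > pvX1 target)) = true
        · rw [if_pos h1, if_pos h1]
        · rw [if_neg h1, if_neg h1]
          simp

-- dominance in the sorted list is dominance in the original (sorted2 is a permutation)
theorem dominatedIn_sorted (scores : List (List Int)) (p : List Int) :
    dominatedIn (PySem.List.sorted2 scores (fun x => -(pvX0 x)) (fun x => pvX1 x)) p
      = dominatedIn scores p := by
  unfold dominatedIn
  exact (PySem.List.sorted2_perm ..).any_eq

-- A's value, characterized over the ORIGINAL list: -1 if the target is dominated,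
-- else 1 + the count of rows with nonnegative second coordinate, bigger sum, non-dominated
theorem solution_char (scores : List (List Int)) :
    solution scores =
      if dominatedIn scores (PySem.List.pyGetD scores 0 []) then -1
      else 1 + (scores.countP (fun s =>
        decide (pvX1 s ≥ 0) && decide (s.sum > (PySem.List.pyGetD scores 0 []).sum)
          && !dominatedIn scores s) : Int) := by
  unfold solution
  have hs := sortedScores_pairwise scores
  simp only [pyGet0_fold, pyGet1_fold]
  rw [loop_spec (PySem.List.pyGetD scores 0 [])
    (PySem.List.sorted2 scores (fun x => -(pvX0 x)) (fun x => pvX1 x)) hs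
    _ [] 0 1 (by simp) (by simp)]
  have hperm := PySem.List.sorted2_perm scores (fun x => -(pvX0 x)) (fun x => pvX1 x) false
  have hany : ((PySem.List.sorted2 scores (fun x => -(pvX0 x)) (fun x => pvX1 x)).any
      (fun s => decide (pvX0 s > pvX0 (PySem.List.pyGetD scores 0 [])) &&
                decide (pvX1 s > pvX1 (PySem.List.pyGetD scores 0 []))))
      = dominatedIn scores (PySem.List.pyGetD scores 0 []) := by
    rw [hperm.any_eq]
    unfold dominatedIn pvX0 pvX1
    rfl
  rw [hany]
  congr 1
  rw [List.countP_congr (fun s _ => by rw [dominatedIn_sorted]),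
    hperm.countP_eq]

-- B's per-row test "s[1] ≥ needed(s)" is exactly "s[1] ≥ 0 and s is not dominated"
theorem needed_le_iff (scores : List (List Int)) (s : List Int) :
    (pvX1 s ≥ neededFn scores s) ↔ (0 ≤ pvX1 s ∧ dominatedIn scores s = false) := by
  unfold neededFn
  rw [ge_iff_le, List.foldl_map]
  simp only [pyGet1_fold]
  have h := foldl_max_le_iff (scores.filter fun q => PySem.List.pyGetD q 0 0 > PySem.List.pyGetD s 0 0) 0 (pvX1 s)
  rw [h]
  unfold dominatedIn
  rw [List.any_eq_false]
  simp only [List.mem_filter, Bool.and_eq_true, decide_eq_true_eq, gt_iff_lt, and_imp,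
    pyGet0_fold, not_and]
  constructor
  · rintro ⟨h0, hall⟩
    exact ⟨h0, fun q hq h1 => by have := hall q hq h1; omega⟩
  · rintro ⟨h0, hnd⟩
    exact ⟨h0, fun q hq h1 => by have := hnd q hq h1; omega⟩

-- B's value with the dominance test and projections folded (definitional: the lets reduce)
theorem solution_alt_char (scores : List (List Int)) :
    solution_alt scores =
      if dominatedIn scores (PySem.List.pyGetD scores 0 []) then -1
      else 1 + (scores.countP (fun s =>
        decide (s.sum > (PySem.List.pyGetD scores 0 []).sum) &&
        decide (pvX1 s ≥ neededFn scores s)) : Int) := rfl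

-- ===== VERDICT (by name: the statement is the Claim_ definition above) =====
theorem solution_spec : Claim_equal_solution := by
  intro scores _ _
  unfold Spec_solution
  rw [solution_char, solution_alt_char]
  by_cases hdt : dominatedIn scores (PySem.List.pyGetD scores 0 []) = true
  · rw [if_pos hdt, if_pos hdt]
  · rw [if_neg hdt, if_neg hdt]
    congr 2
    apply List.countP_congr
    intro s _
    have hn := needed_le_iff scores s
    cases hd : dominatedIn scores s with
    | true =>
      rw [hd] at hn
      have h2 : decide (pvX1 s ≥ neededFn scores s) = false := by
        simp only [decide_eq_false_iff_not]
        intro h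
        exact absurd (hn.mp h).2 (by simp)
      simp [h2]
    | false =>
      rw [hd] at hn
      by_cases h0 : (0:Int) ≤ pvX1 s
      · have h2 : decide (pvX1 s ≥ neededFn scores s) = true := by
          simp only [decide_eq_true_eq]
          exact hn.mpr ⟨h0, rfl⟩
        simp [h2, ge_iff_le, h0, Bool.and_comm]
      · have h2 : decide (pvX1 s ≥ neededFn scores s) = false := by
          simp only [decide_eq_false_iff_not]
          intro h
          exact h0 (hn.mp h).1
        simp [h2, ge_iff_le, h0]
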